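-- pv_equiv track=rewrite | github.com/xbin-xu/cs61a | exam/mt2.py | drip
-- ===== SOURCE A (Python) =====
-- def is_strip(s):
--     """Return whether list s is a strip.
--     >>> is_strip([3, 4, 5, 6])
--     True
--     >>> is_strip([3, 3, 3]) # 3 after 3
--     False
--     >>> is_strip([3, 4, 5, 4, 6]) # 4 after 5
--     False
--     >>> is_strip([3, 4, 5, 5, 6]) # 5 after 5
--     False
--     >>> is_strip([3, 4, 5, 6, 8]) # 8 after 6
--     False
--     >>> is_strip([5])
--     True
--     >>> is_strip([])
--     True
--     """
--     assert type(s) == list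
--     return len(s) == 0 or s == list(range(s[0], s[0] + len(s)))
--
-- def drip(s, t):
--     """Return whether there is a strip made out of interleaving s and t.
--     >>> drip([1, 3, 5], [2, 4, 6]) # 1 2 3 4 5 6
--     True
--     >>> drip([1, 4, 5], [2, 3, 6]) # 1 2 3 4 5 6
--     True
--     >>> drip([1, 2, 3], [4, 5, 6]) # 1 2 3 4 5 6
--     True
--     >>> drip([2, 4, 5], [1, 3, 6]) # No strip starting with 2 can contain 1
--     False
--     >>> drip([1, 2, 4, 5], [1, 3, 6]) # No strip can contain 1 and 1
--     False
--     >>> drip([1, 4, 5], [2, 3, 7]) # No strip can contain 5 and 7 but no 6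
--     False
--     >>> drip([1, 5, 4], [2, 3, 6]) # No strip can contain 5 before 4
--     False
--     >>> drip([2], [3, 4, 5]) # 2 3 4 5
--     True
--     >>> drip([1], [2, 3, 5]) # No strip can contain 3 and 5 but no 4
--     False
--     """
--     while s and t:
--         if s[0] + 1 == t[0]:
--             s, t = t, s[1:]  # The next element of the strip is in t
--         elif len(s) >= 2 and s[0] + 1 == s[1]:
--             s = s[1:]  # The next element of the strip is in s
--         else:
--             return False
--     return is_strip(s)
-- ===== SOURCE B (Python) =====
-- def drip(s, t):
--     """Same result, but with index pointers instead of list slicing: no copies."""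
--     a, b = s, t          # a is the current list, b the other
--     i, j = 0, 0          # read positions in a and b
--     while i < len(a) and j < len(b):
--         if a[i] + 1 == b[j]:
--             a, b, i, j = b, a, j, i + 1   # continue the strip in the other list
--         elif i + 1 < len(a) and a[i] + 1 == a[i + 1]:
--             i += 1                         # continue in the same list
--         else:
--             return False
--     # remainder of the current list must be consecutive (arithmetic scan,
--     # no range list is built)
--     for k in range(i, len(a) - 1):
--         if a[k] + 1 != a[k + 1]:
--             return False
--     return True
-- ===== Notes on version B (the rewrite author's own statement) =====
-- stated objective: alternative
-- what changed: B walks both lists with integer index pointers (swapping which list is current) instead of A's per-step list slicing s[1:], and checks the leftover tail with an arithmetic consecutive-pair scan instead of building and comparing a range list, so no intermediate lists are copied.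
import Mathlib
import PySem

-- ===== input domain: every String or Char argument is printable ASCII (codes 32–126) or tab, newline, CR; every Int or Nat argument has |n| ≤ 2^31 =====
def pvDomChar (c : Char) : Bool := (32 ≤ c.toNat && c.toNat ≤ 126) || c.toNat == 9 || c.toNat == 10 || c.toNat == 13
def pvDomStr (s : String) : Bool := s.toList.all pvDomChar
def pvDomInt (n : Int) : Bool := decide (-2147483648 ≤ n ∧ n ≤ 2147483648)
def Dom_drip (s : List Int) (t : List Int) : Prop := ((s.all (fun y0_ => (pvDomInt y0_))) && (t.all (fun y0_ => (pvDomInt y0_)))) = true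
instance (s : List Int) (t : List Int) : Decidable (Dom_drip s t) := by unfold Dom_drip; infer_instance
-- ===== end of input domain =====

-- B walks the two lists with integer index pointers instead of A's per-step
-- list slicing, and checks the remainder by an arithmetic consecutive-pair
-- scan instead of building a range list: same result, no list copies.

-- ===== PORT A =====
-- is_strip(s): len(s) == 0 or s == list(range(s[0], s[0] + len(s)))
def isStrip (s : List Int) : Bool :=
  decide (s.length = 0) ||
    decide (s = PySem.List.pyRange (s.headD 0) (s.headD 0 + s.length) 1)

-- the while loop: 's and t' nonempty; s[0], t[0], s[1] via pattern matching
def drip (s : List Int) (t : List Int) : Bool :=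
  match s, t with
  | a :: s', b :: t' =>
    if a + 1 = b then drip (b :: t') s'          -- s, t = t, s[1:]
    else
      match s' with
      | a2 :: r => if a + 1 = a2 then drip (a2 :: r) (b :: t') else false   -- s = s[1:]
      | [] => false
  | s, _ => isStrip s
termination_by s.length + t.length
decreasing_by all_goals simp only [List.length_cons]; omega

-- ===== PORT B =====
-- for k in range(i, len(a)-1): if a[k] + 1 != a[k+1]: return False / True
-- (all index accesses are guarded in-bounds, so List.getD is exact here)
def tailConsec (a : List Int) (k : Nat) : Bool :=
  if k + 1 < a.length then
    if a.getD k 0 + 1 = a.getD (k + 1) 0 then tailConsec a (k + 1) else false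
  else true
termination_by a.length - k

def dripAltLoop (a : List Int) (b : List Int) (i j : Nat) : Bool :=
  if i < a.length ∧ j < b.length then
    if a.getD i 0 + 1 = b.getD j 0 then dripAltLoop b a j (i + 1)
    else if i + 1 < a.length ∧ a.getD i 0 + 1 = a.getD (i + 1) 0 then
      dripAltLoop a b (i + 1) j
    else false
  else tailConsec a i
termination_by (a.length - i) + (b.length - j)
decreasing_by all_goals omega

def drip_alt (s : List Int) (t : List Int) : Bool := dripAltLoop s t 0 0

-- ===== PRECONDITION & SPEC =====
def Spec_drip (s : List Int) (t : List Int) (out : Bool) : Prop := out = drip_alt s t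
instance (s : List Int) (t : List Int) (out : Bool) : Decidable (Spec_drip s t out) := by unfold Spec_drip; infer_instance

-- ===== CLAIM (what is proved, stated in full; the proofs are below) =====
def Claim_equal_drip : Prop := ∀ (s : List Int) (t : List Int), Dom_drip s t → Spec_drip s t (drip s t)

-- ===== LEMMAS AND PROOFS =====

-- is_strip on a two-element-or-longer list: head check plus is_strip of the tail
theorem isStrip_cons2 (x y : Int) (ys : List Int) :
    isStrip (x :: y :: ys) = (decide (x + 1 = y) && isStrip (y :: ys)) := by
  simp only [isStrip, List.length_cons, List.headD_cons]
  push_cast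
  have h1 : (x :: y :: ys = PySem.List.pyRange x (x + ((ys.length : Int) + 1 + 1)) 1)
      ↔ (y = x + 1 ∧ ys = PySem.List.pyRange (x + 1 + 1) (x + ((ys.length : Int) + 1 + 1)) 1) := by
    rw [PySem.List.pyRange_one_cons (by omega),
        PySem.List.pyRange_one_cons (by omega)]
    simp [List.cons.injEq]
  have h2 : (y :: ys = PySem.List.pyRange y (y + ((ys.length : Int) + 1)) 1)
      ↔ ys = PySem.List.pyRange (y + 1) (y + ((ys.length : Int) + 1)) 1 := by
    rw [PySem.List.pyRange_one_cons (by omega)]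
    simp
  by_cases h : x + 1 = y
  · subst h
    have e : x + ((ys.length : Int) + 1 + 1) = (x + 1) + ((ys.length : Int) + 1) := by ring
    rw [e] at h1
    simp [e, h1, h2]
  · simp [h1, h2, h]
    intro he
    exact absurd he.symm h
theorem isStrip_singleton (x : Int) : isStrip [x] = true := by
  simp [isStrip]

theorem tailConsec_eq_isStrip (a : List Int) (k : Nat) :
    tailConsec a k = isStrip (a.drop k) := by
  fun_induction tailConsec a k with
  | case1 k h hc ih =>
    rw [List.getD_eq_getElem a 0 (by omega), List.getD_eq_getElem a 0 (by omega)] at hc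
    have e1 : List.drop k a = a[k]'(by omega) :: List.drop (k + 1) a :=
      List.drop_eq_getElem_cons (by omega)
    have e2 : List.drop (k + 1) a = a[k + 1]'(by omega) :: List.drop (k + 2) a :=
      List.drop_eq_getElem_cons (by omega)
    rw [ih, e1, e2, isStrip_cons2, hc]
    simp
  | case2 k h hc =>
    rw [List.getD_eq_getElem a 0 (by omega), List.getD_eq_getElem a 0 (by omega)] at hc
    have e1 : List.drop k a = a[k]'(by omega) :: List.drop (k + 1) a :=
      List.drop_eq_getElem_cons (by omega)
    have e2 : List.drop (k + 1) a = a[k + 1]'(by omega) :: List.drop (k + 2) a :=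
      List.drop_eq_getElem_cons (by omega)
    rw [e1, e2, isStrip_cons2]
    simp [hc]
  | case3 k h =>
    rcases hd : a.drop k with _ | ⟨x, _ | ⟨y, r⟩⟩
    · simp [isStrip]
    · exact (isStrip_singleton x).symm
    · exfalso
      have := congrArg List.length hd
      simp [List.length_drop] at this
      omega
theorem dripAltLoop_eq_drip (a b : List Int) (i j : Nat) :
    dripAltLoop a b i j = drip (a.drop i) (b.drop j) := by
  fun_induction dripAltLoop a b i j with
  | case1 a b i j h hc ih =>
    rw [List.getD_eq_getElem a 0 (by omega), List.getD_eq_getElem b 0 (by omega)] at hc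
    have ea : List.drop i a = a[i]'(by omega) :: List.drop (i + 1) a :=
      List.drop_eq_getElem_cons (by omega)
    have eb : List.drop j b = b[j]'(by omega) :: List.drop (j + 1) b :=
      List.drop_eq_getElem_cons (by omega)
    rw [ih, ea, eb]
    rcases hI : List.drop (i + 1) a with _ | ⟨a2, r⟩
    · rw [drip.eq_2, if_pos hc]
    · rw [drip.eq_1, if_pos hc]
  | case2 a b i j h hc1 hc2 ih =>
    rw [List.getD_eq_getElem a 0 (by omega), List.getD_eq_getElem b 0 (by omega)] at hc1
    rw [List.getD_eq_getElem a 0 (by omega), List.getD_eq_getElem a 0 (by omega)] at hc2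
    have ea : List.drop i a = a[i]'(by omega) :: List.drop (i + 1) a :=
      List.drop_eq_getElem_cons (by omega)
    have ea2 : List.drop (i + 1) a = a[i + 1]'(by omega) :: List.drop (i + 2) a :=
      List.drop_eq_getElem_cons (by omega)
    have eb : List.drop j b = b[j]'(by omega) :: List.drop (j + 1) b :=
      List.drop_eq_getElem_cons (by omega)
    rw [ih, ea, ea2, eb, drip.eq_1, if_neg hc1, if_pos hc2.2]
  | case3 a b i j h hc1 hc2 =>
    rw [List.getD_eq_getElem a 0 (by omega), List.getD_eq_getElem b 0 (by omega)] at hc1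
    have ea : List.drop i a = a[i]'(by omega) :: List.drop (i + 1) a :=
      List.drop_eq_getElem_cons (by omega)
    have eb : List.drop j b = b[j]'(by omega) :: List.drop (j + 1) b :=
      List.drop_eq_getElem_cons (by omega)
    rw [ea, eb]
    by_cases hi : i + 1 < a.length
    · have ea2 : List.drop (i + 1) a = a[i + 1]'(by omega) :: List.drop (i + 2) a :=
        List.drop_eq_getElem_cons (by omega)
      have hne : ¬ a[i]'(by omega) + 1 = a[i + 1]'(by omega) := by
        intro he
        exact hc2 ⟨hi, by
          rw [List.getD_eq_getElem a 0 (by omega), List.getD_eq_getElem a 0 (by omega)]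
          exact he⟩
      rw [ea2, drip.eq_1, if_neg hc1, if_neg hne]
    · have ea2 : List.drop (i + 1) a = [] := List.drop_eq_nil_of_le (by omega)
      rw [ea2, drip.eq_2, if_neg hc1]
  | case4 a b i j h =>
    rw [tailConsec_eq_isStrip]
    rcases ha : List.drop i a with _ | ⟨x, xs⟩ <;> rcases hb : List.drop j b with _ | ⟨y, ys⟩
    · simp [drip]
    · simp [drip]
    · simp [drip]
    · exfalso
      have h1 := congrArg List.length ha
      have h2 := congrArg List.length hb
      simp [List.length_drop] at h1 h2
      omega

-- ===== VERDICT (by name: the statement is the Claim_ definition above) =====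
theorem drip_spec : Claim_equal_drip := by
  intro s t _
  unfold Spec_drip drip_alt
  rw [dripAltLoop_eq_drip]
  simp
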